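-- pv_equiv track=rewrite | github.com/FehintolaObafemi/Shor-s-Algorithm | shor_2_0.py | GetExtendedGCD
-- ===== SOURCE A (Python) =====
-- def GetExtendedGCD(a, b):
--     fractionvals = []
--     while b != 0:
--         fractionvals.append(a // b)
--         tA = a % b
--         a = b
--         b = tA
--     return fractionvals
-- ===== SOURCE B (Python) =====
-- def GetExtendedGCD(a, b):
--     if b == 0:
--         return []
--     return [a // b] + GetExtendedGCD(b, a % b)
-- ===== Notes on version B (the rewrite author's own statement) =====
-- stated objective: simpler
-- what changed: Replaces the while loop with an accumulator list by a direct recursion over the Euclidean reduction that prepends each quotient to the recursive result.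
import Mathlib
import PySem

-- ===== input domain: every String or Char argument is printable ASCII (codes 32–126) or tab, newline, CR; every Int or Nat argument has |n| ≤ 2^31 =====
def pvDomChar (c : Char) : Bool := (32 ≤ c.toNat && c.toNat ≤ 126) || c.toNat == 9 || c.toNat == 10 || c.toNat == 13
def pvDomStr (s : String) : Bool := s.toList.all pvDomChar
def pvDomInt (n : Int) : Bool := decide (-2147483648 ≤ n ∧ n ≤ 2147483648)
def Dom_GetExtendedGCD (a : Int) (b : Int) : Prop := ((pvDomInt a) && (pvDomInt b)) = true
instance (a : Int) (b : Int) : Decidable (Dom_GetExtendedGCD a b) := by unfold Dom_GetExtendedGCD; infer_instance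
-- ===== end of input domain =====

-- B replaces A's while loop + accumulator by a direct head-cons recursion over the Euclidean reduction (objective: simpler).


-- Python's a % b has the divisor's sign and smaller absolute value (b ≠ 0): the loop/recursion terminates on |b|.
theorem pyMod_natAbs_lt (a b : Int) (hb : b ≠ 0) : (PySem.Int.mod a b).natAbs < b.natAbs := by
  rcases lt_trichotomy b 0 with h | h | h
  · have := PySem.Int.mod_neg_bounds a (b := b) h
    omega
  · exact absurd h hb
  · have h1 := PySem.Int.mod_nonneg a (b := b) h
    have h2 := PySem.Int.mod_lt a (b := b) h
    omega

-- ===== PORT A =====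
-- the while loop of A, with the accumulator list being appended to (fractionvals)
def GetExtendedGCD_loop (a b : Int) (acc : List Int) : List Int :=
  if b = 0 then acc
  else GetExtendedGCD_loop b (PySem.Int.mod a b) (acc ++ [PySem.Int.floordiv a b])
termination_by b.natAbs
decreasing_by exact pyMod_natAbs_lt a b (by assumption)

def GetExtendedGCD (a : Int) (b : Int) : List Int :=
  GetExtendedGCD_loop a b []

-- ===== PORT B =====
def GetExtendedGCD_alt (a : Int) (b : Int) : List Int :=
  if b = 0 then []
  else PySem.Int.floordiv a b :: GetExtendedGCD_alt b (PySem.Int.mod a b)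
termination_by b.natAbs
decreasing_by exact pyMod_natAbs_lt a b (by assumption)

-- ===== PRECONDITION & SPEC =====
def Spec_GetExtendedGCD (a : Int) (b : Int) (out : List Int) : Prop := out = GetExtendedGCD_alt a b
instance (a : Int) (b : Int) (out : List Int) : Decidable (Spec_GetExtendedGCD a b out) := by unfold Spec_GetExtendedGCD; infer_instance

-- ===== CLAIM (what is proved, stated in full; the proofs are below) =====
def Claim_equal_GetExtendedGCD : Prop := ∀ (a : Int) (b : Int), Dom_GetExtendedGCD a b → Spec_GetExtendedGCD a b (GetExtendedGCD a b)

-- ===== LEMMAS AND PROOFS =====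
theorem loop_eq_acc_append (n : ℕ) : ∀ (a b : Int), b.natAbs ≤ n → ∀ (acc : List Int),
    GetExtendedGCD_loop a b acc = acc ++ GetExtendedGCD_alt a b := by
  induction n with
  | zero =>
    intro a b hb acc
    have hb0 : b = 0 := by omega
    rw [GetExtendedGCD_loop, GetExtendedGCD_alt]
    simp [hb0]
  | succ n ih =>
    intro a b hb acc
    rw [GetExtendedGCD_loop, GetExtendedGCD_alt]
    by_cases hb0 : b = 0
    · simp [hb0]
    · simp only [hb0, dif_neg, not_false_iff]
      have := pyMod_natAbs_lt a b hb0
      rw [ih b (PySem.Int.mod a b) (by omega)]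
      simp

-- ===== VERDICT (by name: the statement is the Claim_ definition above) =====
theorem GetExtendedGCD_spec : Claim_equal_GetExtendedGCD := by
  intro a b _
  unfold Spec_GetExtendedGCD GetExtendedGCD
  simpa using loop_eq_acc_append b.natAbs a b le_rfl []
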